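-- pv_equiv track=rewrite | github.com/lannieligthart/advent_of_code | 2023/10/part1&2.py | count
-- ===== SOURCE A (Python) =====
-- def count(line):
--     # Count number of pipes. Once you reach a dot, if the number of pipes is an odd number, count the dot.
--     enclosed = 0
--     pipes = 0
--     for char in line:
--         if char == "|":
--             pipes += 1
--         elif char == ".":
--             if pipes % 2 == 1:
--                 enclosed += 1
--     return enclosed
-- ===== SOURCE B (Python) =====
-- def count(line):
--     # Segments between '|' separators: a character in segment i of line.split('|')
--     # is preceded by exactly i pipes, so dots in odd-indexed segments are enclosed.
--     return sum(part.count('.') for i, part in enumerate(line.split('|')) if i % 2 == 1)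
-- ===== Notes on version B (the rewrite author's own statement) =====
-- stated objective: simpler
-- what changed: Replaces the char-by-char loop with a running pipe-parity counter by splitting the line on the pipe character and summing dot-counts of the odd-indexed segments (segment index = pipes seen so far).
import Mathlib
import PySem

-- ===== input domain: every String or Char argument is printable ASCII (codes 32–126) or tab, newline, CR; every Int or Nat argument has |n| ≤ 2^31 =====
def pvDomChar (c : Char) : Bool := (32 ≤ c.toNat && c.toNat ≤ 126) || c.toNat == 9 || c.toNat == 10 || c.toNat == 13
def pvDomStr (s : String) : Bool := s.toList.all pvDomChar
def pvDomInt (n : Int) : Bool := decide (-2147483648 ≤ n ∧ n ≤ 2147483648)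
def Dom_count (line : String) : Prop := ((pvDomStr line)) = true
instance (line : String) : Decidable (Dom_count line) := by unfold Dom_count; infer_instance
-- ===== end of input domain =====

-- B replaces A's stateful pipe-parity counter with split-on-pipe plus summing dot-counts of odd-indexed segments (simpler decomposition; measured faster via C-level str.split/str.count).


-- ===== PORT A =====
def count (line : String) : Int :=
  (line.toList.foldl
    (fun st c =>
      if c == '|' then (st.1, st.2 + 1)
      else if c == '.' then (if st.2 % 2 == 1 then (st.1 + 1, st.2) else st)
      else st)
    ((0 : Int), (0 : Int))).1

-- ===== PORT B =====
def count_alt (line : String) : Int :=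
  (PySem.List.enumerate ((PySem.Str.split? line "|").getD [])).foldl
    (fun acc ip => if ip.1 % 2 == 1 then acc + (PySem.Str.count ip.2 "." : Int) else acc) 0

-- ===== PRECONDITION & SPEC =====
def Spec_count (line : String) (out : Int) : Prop := out = count_alt line
instance (line : String) (out : Int) : Decidable (Spec_count line out) := by unfold Spec_count; infer_instance

-- ===== CLAIM (what is proved, stated in full; the proofs are below) =====
def Claim_equal_count : Prop := ∀ (line : String), Dom_count line → Spec_count line (count line)

-- ===== LEMMAS AND PROOFS =====

-- alternating sum of '.'-counts: counts dots in the segments at "true" positions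
def pvAltSum : Bool → List (List Char) → Int
  | _, [] => 0
  | b, s :: rest => (if b then (s.count '.' : Int) else 0) + pvAltSum (!b) rest

-- Chars.count with a single-character needle is List.count
theorem pvCountGo_single (l : List Char) : ∀ (fuel acc : Nat), l.length ≤ fuel →
    PySem.Chars.count.go ['.'] fuel l acc = acc + l.count '.' := by
  induction l with
  | nil => intro fuel acc _; cases fuel <;> simp [PySem.Chars.count.go]
  | cons c t ih =>
    intro fuel acc h
    cases fuel with
    | zero => simp at h
    | succ f =>
      simp only [PySem.Chars.count.go, List.isPrefixOf, List.length_cons] at *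
      by_cases hc : c = '.'
      · simp [hc, ih f (acc + 1) (by omega)]; omega
      · have : (('.' == c) && true) = false := by simp [Ne.symm hc]
        simp [this, ih f acc (by omega), hc]

theorem pvCount_single (cs : List Char) : PySem.Chars.count cs ['.'] = cs.count '.' := by
  simpa [PySem.Chars.count] using pvCountGo_single cs cs.length 0 le_rfl

-- Chars.splitOn on a single-char separator is List.splitOnP
theorem pvSplitGo (l : List Char) : ∀ (fuel : Nat) (cur : List Char) (acc : List (List Char)),
    l.length ≤ fuel →
    PySem.Chars.splitOn.go ['|'] fuel l cur acc
      = acc.reverse ++ (List.splitOnP (fun c => '|' == c) l).modifyHead (cur.reverse ++ ·) := by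
  induction l with
  | nil =>
    intro fuel cur acc _
    cases fuel <;> simp [PySem.Chars.splitOn.go, List.splitOnP_nil]
  | cons c t ih =>
    intro fuel cur acc h
    cases fuel with
    | zero => simp at h
    | succ f =>
      simp only [List.length_cons] at h
      by_cases hc : c = '|'
      · have hpre : (List.isPrefixOf ['|'] (c :: t)) = true := by
          simp [List.isPrefixOf, hc]
        simp only [PySem.Chars.splitOn.go, hpre, List.length_singleton,
          List.drop_succ_cons, List.drop_zero]
        rw [ih f [] (cur.reverse :: acc) (by omega)]
        obtain ⟨s, rest, hs⟩ : ∃ s rest, List.splitOnP (fun c => '|' == c) t = s :: rest := by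
          rcases hl : List.splitOnP (fun c => '|' == c) t with _ | ⟨s, rest⟩
          · exact absurd hl (List.splitOnP_ne_nil _ t)
          · exact ⟨s, rest, rfl⟩
        simp [List.splitOnP_cons, hc, hs]
      · have hpre : (List.isPrefixOf ['|'] (c :: t)) = false := by
          simp [List.isPrefixOf, Ne.symm hc]
        simp only [PySem.Chars.splitOn.go, hpre, Bool.false_eq_true, if_false]
        rw [ih f (c :: cur) acc (by omega)]
        obtain ⟨s, rest, hs⟩ : ∃ s rest, List.splitOnP (fun c => '|' == c) t = s :: rest := by
          rcases hl : List.splitOnP (fun c => '|' == c) t with _ | ⟨s, rest⟩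
          · exact absurd hl (List.splitOnP_ne_nil _ t)
          · exact ⟨s, rest, rfl⟩
        simp [List.splitOnP_cons, Ne.symm hc, hs]

theorem pvSplit_single (cs : List Char) :
    PySem.Chars.splitOn cs ['|'] = List.splitOnP (fun c => '|' == c) cs := by
  rw [PySem.Chars.splitOn, pvSplitGo cs (cs.length + 1) [] [] (by omega)]
  rcases hl : List.splitOnP (fun c => '|' == c) cs with _ | ⟨s, rest⟩
  · exact absurd hl (List.splitOnP_ne_nil _ cs)
  · simp

-- integer parity flips when adding one
theorem pvParityFlip (p : Int) : ((p + 1) % 2 == 1) = !(p % 2 == 1) := by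
  rcases Int.emod_two_eq p with h | h <;>
    · have : (p + 1) % 2 = (p % 2 + 1) % 2 := by omega
      simp [this, h]

-- A's fold computes the alternating sum over the segments
theorem pvFoldA (cs : List Char) : ∀ (acc pipes : Int),
    (cs.foldl
      (fun st c =>
        if c == '|' then (st.1, st.2 + 1)
        else if c == '.' then (if st.2 % 2 == 1 then (st.1 + 1, st.2) else st)
        else st)
      (acc, pipes)).1
    = acc + pvAltSum (pipes % 2 == 1) (List.splitOnP (fun c => '|' == c) cs) := by
  induction cs with
  | nil => intro acc pipes; simp [List.splitOnP_nil, pvAltSum]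
  | cons c t ih =>
    intro acc pipes
    obtain ⟨s, rest, hs⟩ : ∃ s rest, List.splitOnP (fun c => '|' == c) t = s :: rest := by
      rcases hl : List.splitOnP (fun c => '|' == c) t with _ | ⟨s, rest⟩
      · exact absurd hl (List.splitOnP_ne_nil _ t)
      · exact ⟨s, rest, rfl⟩
    by_cases hc : c = '|'
    · simp only [List.foldl_cons, hc, beq_self_eq_true, if_true]
      rw [ih acc (pipes + 1)]
      simp [List.splitOnP_cons, pvAltSum, pvParityFlip]
    · by_cases hd : c = '.'
      · simp only [List.foldl_cons, hd]
        by_cases hp : pipes % 2 == 1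
        · simp only [hp, if_true]
          rw [show (('.' == '|') = false) by decide]
          simp only [Bool.false_eq_true, if_false, beq_self_eq_true, if_true]
          rw [ih (acc + 1) pipes]
          simp [List.splitOnP_cons, hs, pvAltSum, hp]
          omega
        · simp only [hp, Bool.false_eq_true, if_false]
          rw [show (('.' == '|') = false) by decide]
          simp only [Bool.false_eq_true, if_false, beq_self_eq_true, if_true]
          rw [ih acc pipes]
          simp [List.splitOnP_cons, hs, pvAltSum, hp]
      · have h1 : ((c == '|') = false) := by simp [hc]
        have h2 : ((c == '.') = false) := by simp [hd]
        simp only [List.foldl_cons, h1, h2, Bool.false_eq_true, if_false]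
        rw [ih acc pipes]
        simp [List.splitOnP_cons, Ne.symm hc, hd, hs, pvAltSum]

-- B's fold over the enumerated segments computes the same alternating sum
theorem pvFoldB (segs : List (List Char)) : ∀ (n acc : Int),
    (PySem.List.enumerate (segs.map String.ofList) n).foldl
      (fun acc ip => if ip.1 % 2 == 1 then acc + (PySem.Str.count ip.2 "." : Int) else acc) acc
    = acc + pvAltSum (n % 2 == 1) segs := by
  induction segs with
  | nil => intro n acc; simp [pvAltSum]
  | cons s rest ih =>
    intro n acc
    simp only [List.map_cons, PySem.List.enumerate, List.foldl_cons]
    rw [ih (n + 1)]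
    have hcnt : (PySem.Str.count (String.ofList s) "." : Int) = (s.count '.' : Int) := by
      have : PySem.Str.count (String.ofList s) "." = PySem.Chars.count s ['.'] := by
        simp [PySem.Str.count]
      rw [this, pvCount_single]
    by_cases hp : n % 2 == 1
    · simp only [hp, if_true]
      simp only [pvAltSum, hp, pvParityFlip, Bool.not_true, if_true]
      rw [hcnt]; ring
    · simp only [hp, Bool.false_eq_true, if_false]
      simp only [pvAltSum, hp, pvParityFlip, Bool.not_false, Bool.false_eq_true, if_false]
      ring

-- ===== VERDICT (by name: the statement is the Claim_ definition above) =====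
theorem count_spec : Claim_equal_count := by
  intro line _
  unfold Spec_count count count_alt
  have hsplit : (PySem.Str.split? line "|").getD []
      = (PySem.Chars.splitOn line.toList ['|']).map String.ofList := by
    simp [PySem.Str.split?, PySem.Chars.split?]
  rw [hsplit, pvSplit_single, pvFoldB _ 0 0, pvFoldA]
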